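-- pv_equiv track=rewrite | github.com/MarieNoelleGrant/adventOfCode | day01/fuelCounter_part2.py | calc_fuel_needed
-- ===== SOURCE A (Python) =====
-- import math
--
-- def calc_fuel_needed(module_mass):
--     all_fuel = 0
--     # 1. Calcul du fuel de base pour la masse
--     fuel_for_mass = math.floor(int(module_mass)/3)-2
--     fuel_for_fuel = fuel_for_mass
--     # 2. Calcul du fuel supplémentaire pour le fuel ajouté
--     while fuel_for_fuel > 0:
--         all_fuel += fuel_for_fuel
--         fuel_for_fuel = math.floor(int(fuel_for_fuel) / 3) - 2
--
--     return all_fuel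
-- ===== SOURCE B (Python) =====
-- import math
--
-- def calc_fuel_needed(module_mass):
--     fuel = int(module_mass) // 3 - 2
--     if fuel <= 0:
--         return 0
--     return fuel + calc_fuel_needed(fuel)
-- ===== Notes on version B (the rewrite author's own statement) =====
-- stated objective: simpler
-- what changed: Replaced the while-loop accumulator with the canonical recursive fuel recurrence (f = m//3 - 2; 0 if f <= 0, else f + calc_fuel_needed(f)).
import Mathlib
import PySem

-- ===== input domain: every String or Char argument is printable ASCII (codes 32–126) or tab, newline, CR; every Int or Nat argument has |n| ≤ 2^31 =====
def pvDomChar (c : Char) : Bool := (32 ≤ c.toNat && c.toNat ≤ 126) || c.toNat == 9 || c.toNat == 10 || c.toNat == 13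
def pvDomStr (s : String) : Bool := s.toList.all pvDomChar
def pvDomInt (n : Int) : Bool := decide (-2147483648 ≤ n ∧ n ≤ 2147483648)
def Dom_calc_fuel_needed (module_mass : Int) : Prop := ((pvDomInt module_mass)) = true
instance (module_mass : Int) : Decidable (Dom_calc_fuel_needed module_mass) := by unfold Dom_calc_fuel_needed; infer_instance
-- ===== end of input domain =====

-- ===== PORT A =====
-- One honest line: B replaces A's while-loop accumulation by the direct recursive fuel recurrence (simpler decomposition, same values).
-- A's while-loop, as structural recursion on the positive fuel value (accumulator `all_fuel`).
def calcFuelLoopA (fuel_for_fuel all_fuel : Int) : Int :=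
  if h : fuel_for_fuel > 0 then
    calcFuelLoopA (PySem.Int.floordiv fuel_for_fuel 3 - 2) (all_fuel + fuel_for_fuel)
  else all_fuel
termination_by fuel_for_fuel.toNat
decreasing_by
  have h3 : PySem.Int.floordiv fuel_for_fuel 3 = fuel_for_fuel / 3 :=
    PySem.Int.floordiv_eq_ediv_of_pos (by norm_num)
  omega

-- math.floor(int(m)/3) on |m| <= 2^31 equals floor division by 3 (the float quotient cannot cross an integer); ported as floordiv.
def calc_fuel_needed (module_mass : Int) : Int :=
  calcFuelLoopA (PySem.Int.floordiv module_mass 3 - 2) 0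

-- ===== PORT B =====
def calc_fuel_needed_alt (module_mass : Int) : Int :=
  let fuel := PySem.Int.floordiv module_mass 3 - 2
  if h : fuel ≤ 0 then 0
  else fuel + calc_fuel_needed_alt fuel
termination_by module_mass.toNat
decreasing_by
  have h3 : PySem.Int.floordiv module_mass 3 = module_mass / 3 :=
    PySem.Int.floordiv_eq_ediv_of_pos (by norm_num)
  simp only [fuel] at *
  omega

-- ===== PRECONDITION & SPEC =====
def Spec_calc_fuel_needed (module_mass : Int) (out : Int) : Prop := out = calc_fuel_needed_alt module_mass
instance (module_mass : Int) (out : Int) : Decidable (Spec_calc_fuel_needed module_mass out) := by unfold Spec_calc_fuel_needed; infer_instance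

-- ===== CLAIM (what is proved, stated in full; the proofs are below) =====
def Claim_equal_calc_fuel_needed : Prop := ∀ (module_mass : Int), Dom_calc_fuel_needed module_mass → Spec_calc_fuel_needed module_mass (calc_fuel_needed module_mass)

-- ===== LEMMAS AND PROOFS =====
theorem alt_eq (m : Int) :
    calc_fuel_needed_alt m =
      if 0 < m / 3 - 2 then (m / 3 - 2) + calc_fuel_needed_alt (m / 3 - 2) else 0 := by
  rw [calc_fuel_needed_alt]
  have h3 : PySem.Int.floordiv m 3 = m / 3 :=
    PySem.Int.floordiv_eq_ediv_of_pos (by norm_num)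
  simp only [h3]
  by_cases h2 : 0 < m / 3 - 2
  · rw [dif_neg (by omega), if_pos h2]
  · rw [dif_pos (by omega), if_neg h2]

theorem loopA_eq_alt (f acc : Int) :
    calcFuelLoopA f acc = acc + (if 0 < f then f + calc_fuel_needed_alt f else 0) := by
  by_cases h : 0 < f
  · have h3 : PySem.Int.floordiv f 3 = f / 3 :=
      PySem.Int.floordiv_eq_ediv_of_pos (by norm_num)
    rw [calcFuelLoopA]
    rw [dif_pos h, if_pos h]
    rw [loopA_eq_alt (PySem.Int.floordiv f 3 - 2) (acc + f)]
    rw [alt_eq f]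
    simp only [h3]
    by_cases h2 : 0 < f / 3 - 2
    · rw [if_pos h2]; ring
    · rw [if_neg h2]; ring
  · rw [calcFuelLoopA]
    simp [h]
termination_by f.toNat
decreasing_by
  have h3 : PySem.Int.floordiv f 3 = f / 3 :=
    PySem.Int.floordiv_eq_ediv_of_pos (by norm_num)
  omega

-- ===== VERDICT (by name: the statement is the Claim_ definition above) =====
theorem calc_fuel_needed_spec : Claim_equal_calc_fuel_needed := by
  intro m _
  unfold Spec_calc_fuel_needed calc_fuel_needed
  rw [loopA_eq_alt, alt_eq m]
  have h3 : PySem.Int.floordiv m 3 = m / 3 :=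
    PySem.Int.floordiv_eq_ediv_of_pos (by norm_num)
  simp only [h3]
  by_cases h2 : 0 < m / 3 - 2
  · rw [if_pos h2]; ring
  · rw [if_neg h2]; ring
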